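-- pv_equiv track=rewrite | github.com/utsabhaldar/CodeForces-Contests-utsabhaldar | E_Nearly_Shortest_Repeating_Substring.py | shortest_k_length
-- ===== SOURCE A (Python) =====
-- def shortest_k_length(s):
--     freq = {}
--     for char in s:
--         if char in freq:
--             freq[char] += 1
--         else:
--             freq[char] = 1
--
--     # If there is a character with frequency greater than n/2
--     if max(freq.values()) > len(s) // 2:
--         return 1
--
--     # If there are at least two different characters with frequency greater than 1
--     if len(freq) > 1 and max(freq.values()) > 1:
--         return max(freq.values())
--
--     # If there is only one character with frequency greater than 1
--     if len(freq) == 1 and max(freq.values()) > 1: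
--         return max(freq.values())
--
--     # If none of the above conditions are satisfied
--     return len(s) - 1
-- ===== SOURCE B (Python) =====
-- def shortest_k_length(s):
--     best = 0
--     run = 0
--     prev = None
--     for ch in sorted(s):
--         if prev == ch:
--             run += 1
--         else:
--             run = 1
--             prev = ch
--         best = max(best, run)
--     n = len(s)
--     if best > n // 2:
--         return 1
--     if best > 1:
--         return best
--     return n - 1
-- ===== Notes on version B (the rewrite author's own statement) =====
-- stated objective: alternative
-- what changed: Replaces the hash-table frequency dict and max over its values by sorting the characters and scanning the sorted sequence for the longest run of equal characters, a different data representation and traversal.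
import Mathlib
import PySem

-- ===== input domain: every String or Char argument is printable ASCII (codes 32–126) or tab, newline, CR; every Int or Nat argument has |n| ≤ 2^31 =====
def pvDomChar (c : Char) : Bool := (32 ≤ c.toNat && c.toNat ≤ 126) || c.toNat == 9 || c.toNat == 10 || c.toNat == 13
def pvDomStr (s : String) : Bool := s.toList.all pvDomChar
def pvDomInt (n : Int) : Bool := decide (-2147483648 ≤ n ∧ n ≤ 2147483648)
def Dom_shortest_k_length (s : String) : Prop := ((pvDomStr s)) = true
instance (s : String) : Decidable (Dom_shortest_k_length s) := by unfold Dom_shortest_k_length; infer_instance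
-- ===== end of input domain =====

-- B replaces A's frequency dict + max-over-values by sort-then-longest-run (alternative data representation, not faster).


-- ===== PORT A =====
def shortest_k_length (s : String) : Int :=
  let freq := s.toList.foldl
    (fun (d : PySem.Dict Char Int) c =>
      if d.contains c then d.modify c 0 (· + 1) else d.insert c 1)
    PySem.Dict.empty
  match PySem.List.max? freq.values (fun v => v) with
  | none => 0   -- unreachable under Pre_: Python's max() raises ValueError on the empty string
  | some m =>
    if m > PySem.Int.floordiv (PySem.Str.len s) 2 then 1
    else if (freq.size : Int) > 1 ∧ m > 1 then m
    else if (freq.size : Int) = 1 ∧ m > 1 then m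
    else PySem.Str.len s - 1

-- ===== PORT B =====
-- one scan step of B's run loop over the sorted characters: state (best, run, prev)
def pvRunStep (acc : Int × Int × Option Char) (c : Char) : Int × Int × Option Char :=
  let run := if acc.2.2 = some c then acc.2.1 + 1 else 1
  (max acc.1 run, run, some c)

def shortest_k_length_alt (s : String) : Int :=
  let st := (PySem.List.sorted s.toList (fun c => c) false).foldl pvRunStep
      ((0 : Int), (0 : Int), (none : Option Char))
  let best := st.1
  let n := PySem.Str.len s
  if best > PySem.Int.floordiv n 2 then 1
  else if best > 1 then best
  else n - 1

-- ===== PRECONDITION & SPEC =====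
-- Pre_ excludes only the empty string, on which A's max() raises ValueError.
def Pre_shortest_k_length (s : String) : Prop := s ≠ ""
instance (s : String) : Decidable (Pre_shortest_k_length s) := by unfold Pre_shortest_k_length; infer_instance
def pvWitness_shortest_k_length : String := "aab"

def Spec_shortest_k_length (s : String) (out : Int) : Prop := out = shortest_k_length_alt s
instance (s : String) (out : Int) : Decidable (Spec_shortest_k_length s out) := by unfold Spec_shortest_k_length; infer_instance

-- ===== CLAIM (what is proved, stated in full; the proofs are below) =====
def Claim_equal_shortest_k_length : Prop := ∀ (s : String), Dom_shortest_k_length s → Pre_shortest_k_length s → Spec_shortest_k_length s (shortest_k_length s)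

-- ===== LEMMAS AND PROOFS =====

-- the value B's run scan yields from state (b, r, some c), as a standalone recursion
def pvN (r : Int) (c : Char) : List Char → Int
  | [] => r
  | x :: xs => if x = c then pvN (r + 1) c xs else max r (pvN 1 x xs)

-- maximum multiplicity of any character (fuel-based recursion; fuel ≥ length suffices)
def pvMf : Nat → List Char → Int
  | _, [] => 0
  | 0, _ :: _ => 0
  | fuel + 1, x :: xs => max (1 + (xs.count x : Int)) (pvMf fuel (xs.filter (fun y => y ≠ x)))

def pvMx (u : List Char) : Int := pvMf u.length u

lemma pvN_ge (t : List Char) : ∀ r c, r ≤ pvN r c t := by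
  induction t with
  | nil => intro r c; simp [pvN]
  | cons x xs ih =>
    intro r c
    by_cases h : x = c <;> simp [pvN, h]
    · exact le_trans (by omega) (ih (r + 1) c)

lemma pvRun_foldl (t : List Char) : ∀ b r c, r ≤ b →
    (t.foldl pvRunStep (b, r, some c)).1 = max b (pvN r c t) := by
  induction t with
  | nil => intro b r c h; simp [pvN]; omega
  | cons x xs ih =>
    intro b r c h
    by_cases hx : x = c
    · subst hx
      simp only [List.foldl_cons, pvRunStep, pvN, if_true]
      rw [ih _ _ _ (le_max_right b (r + 1))]
      have := pvN_ge xs (r + 1) x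
      omega
    · have hcx : ¬ (some c = some x) := by
        simpa using fun h : c = x => hx h.symm
      simp only [List.foldl_cons, pvRunStep, pvN, if_neg hcx, if_neg hx]
      rw [ih _ _ _ (le_max_right b 1)]
      have := pvN_ge xs 1 x
      omega

lemma pvMf_nonneg : ∀ fuel u, 0 ≤ pvMf fuel u := by
  intro fuel
  induction fuel with
  | zero => intro u; cases u <;> simp [pvMf]
  | succ f ih =>
    intro u
    cases u with
    | nil => simp [pvMf]
    | cons x xs =>
      have := ih (xs.filter (fun y => y ≠ x))
      simp only [pvMf]
      omega

lemma pvMf_fuel : ∀ f₁ f₂ u, u.length ≤ f₁ → u.length ≤ f₂ → pvMf f₁ u = pvMf f₂ u := by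
  intro f₁
  induction f₁ with
  | zero =>
    intro f₂ u h₁ _
    have : u = [] := List.length_eq_zero_iff.1 (Nat.le_zero.1 h₁)
    subst this; cases f₂ <;> simp [pvMf]
  | succ f ih =>
    intro f₂ u h₁ h₂
    cases u with
    | nil => cases f₂ <;> simp [pvMf]
    | cons x xs =>
      cases f₂ with
      | zero => simp at h₂
      | succ g =>
        simp only [pvMf]
        have hlf : (xs.filter (fun y => y ≠ x)).length ≤ xs.length := List.length_filter_le _ _
        rw [ih g _ (by simp at h₁; omega) (by simp at h₂; omega)]

lemma pvMf_le : ∀ fuel u, u.length ≤ fuel → ∀ c ∈ u, (u.count c : Int) ≤ pvMf fuel u := by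
  intro fuel
  induction fuel with
  | zero =>
    intro u h c hc
    have : u = [] := List.length_eq_zero_iff.1 (Nat.le_zero.1 h)
    subst this; simp at hc
  | succ f ih =>
    intro u h c hc
    cases u with
    | nil => simp at hc
    | cons x xs =>
      simp only [pvMf]
      by_cases hcx : c = x
      · subst hcx
        simp only [List.count_cons_self]
        push_cast; omega
      · have hcu : c ∈ xs := by
          rcases List.mem_cons.1 hc with h' | h'
          · exact absurd h' hcx
          · exact h'
        have hcf : c ∈ xs.filter (fun y => y ≠ x) := by
          simp [List.mem_filter, hcu, hcx]
        have hlf : (xs.filter (fun y => y ≠ x)).length ≤ xs.length := List.length_filter_le _ _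
        have h1 := ih (xs.filter (fun y => y ≠ x)) (by simp at h; omega) c hcf
        have h2 : (xs.filter (fun y => y ≠ x)).count c = xs.count c := by
          rw [List.count_filter]; simp [hcx]
        have h3 : (x :: xs).count c = xs.count c :=
          List.count_cons_of_ne (fun h' => hcx h'.symm)
        rw [h3, ← h2]
        omega

lemma pvMf_exists : ∀ fuel u, u.length ≤ fuel → u ≠ [] →
    ∃ c ∈ u, (u.count c : Int) = pvMf fuel u := by
  intro fuel
  induction fuel with
  | zero =>
    intro u h hne
    exact absurd (List.length_eq_zero_iff.1 (Nat.le_zero.1 h)) hne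
  | succ f ih =>
    intro u h hne
    cases u with
    | nil => exact absurd rfl hne
    | cons x xs =>
      by_cases hM : pvMf f (xs.filter (fun y => y ≠ x)) ≤ 1 + (xs.count x : Int)
      · refine ⟨x, by simp, ?_⟩
        simp only [pvMf, List.count_cons_self]
        push_cast; omega
      · push_neg at hM
        have hnef : xs.filter (fun y => y ≠ x) ≠ [] := by
          intro h'
          rw [h'] at hM
          have : (0 : Int) ≤ (xs.count x : Int) := by positivity
          cases f <;> simp [pvMf] at hM <;> omega
        have hlf : (xs.filter (fun y => y ≠ x)).length ≤ xs.length := List.length_filter_le _ _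
        obtain ⟨c, hcf, hcc⟩ := ih (xs.filter (fun y => y ≠ x)) (by simp at h; omega) hnef
        have hcx : c ≠ x := by simpa using (List.mem_filter.1 hcf).2
        have hcu : c ∈ xs := (List.mem_filter.1 hcf).1
        refine ⟨c, by simp [hcu], ?_⟩
        have h2 : (xs.filter (fun y => y ≠ x)).count c = xs.count c := by
          rw [List.count_filter]; simp [hcx]
        have h3 : (x :: xs).count c = xs.count c :=
          List.count_cons_of_ne (fun h' => hcx h'.symm)
        simp only [pvMf]
        rw [h3, ← h2, hcc]
        have := pvMf_nonneg f (xs.filter (fun y => y ≠ x))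
        omega

lemma pvMx_le (u : List Char) : ∀ c ∈ u, (u.count c : Int) ≤ pvMx u :=
  pvMf_le u.length u le_rfl

lemma pvMx_exists (u : List Char) (h : u ≠ []) : ∃ c ∈ u, (u.count c : Int) = pvMx u :=
  pvMf_exists u.length u le_rfl h

lemma pvMx_cons (x : Char) (xs : List Char) :
    pvMx (x :: xs) = max (1 + (xs.count x : Int)) (pvMx (xs.filter (fun y => y ≠ x))) := by
  simp only [pvMx, List.length_cons, pvMf]
  rw [pvMf_fuel xs.length (xs.filter (fun y => y ≠ x)).length
    (xs.filter (fun y => y ≠ x)) (List.length_filter_le _ _) le_rfl]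

lemma pvN_sorted (t : List Char) : ∀ c r, 1 ≤ r → (c :: t).Pairwise (· ≤ ·) →
    pvN r c t = max (r + (t.count c : Int)) (pvMx (t.filter (fun y => y ≠ c))) := by
  induction t with
  | nil =>
    intro c r hr _
    simp [pvN, pvMx, pvMf]
    omega
  | cons x xs ih =>
    intro c r hr hp
    by_cases hx : x = c
    · subst hx
      simp only [pvN, List.count_cons_self, List.filter_cons]
      rw [ih x (r + 1) (by omega) hp.of_cons]
      simp only [ne_eq, not_true_eq_false, decide_false, Bool.false_eq_true, if_false]
      push_cast
      ring_nf
    · -- c < x and x ≤ every later element, so c occurs nowhere in x :: xs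
      have hcx : c ≤ x := (List.pairwise_cons.1 hp).1 x (by simp)
      have hxle : ∀ y ∈ xs, x ≤ y := (List.pairwise_cons.1 hp.of_cons).1
      have hcnot : c ∉ x :: xs := by
        intro hm
        rcases List.mem_cons.1 hm with h | h
        · exact hx h.symm
        · exact hx (le_antisymm (hxle c h) hcx)
      have hcount : (x :: xs).count c = 0 := List.count_eq_zero.2 hcnot
      have hfilter : (x :: xs).filter (fun y => y ≠ c) = x :: xs := by
        apply List.filter_eq_self.2
        intro y hy
        simp only [ne_eq, decide_eq_true_eq]
        intro hyc; subst hyc; exact hcnot hy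
      simp only [pvN, if_neg hx]
      rw [ih x 1 (by omega) hp.of_cons, hcount, hfilter, pvMx_cons]
      omega

-- A's loop builds exactly the counter dict
lemma pvFreq_eq_counter (l : List Char) :
    l.foldl (fun (d : PySem.Dict Char Int) c =>
        if d.contains c then d.modify c 0 (· + 1) else d.insert c 1)
      PySem.Dict.empty = PySem.Dict.counter l := by
  rw [PySem.Dict.counter_eq_foldl]
  congr 1
  funext d c
  by_cases h : d.contains c
  · simp [h]
  · simp only [h, Bool.false_eq_true, if_false]
    simp [PySem.Dict.modify, PySem.Dict.getD_of_not_contains, h]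

-- evaluating B on a nonempty sorted list: the best run is the max multiplicity
lemma pvBest_eq (t : List Char) (htne : t ≠ []) (hpw : t.Pairwise (· ≤ ·)) :
    (t.foldl pvRunStep ((0 : Int), (0 : Int), (none : Option Char))).1 = pvMx t := by
  obtain ⟨x, xs, rfl⟩ := List.exists_cons_of_ne_nil htne
  have hstep : pvRunStep ((0 : Int), (0 : Int), (none : Option Char)) x
      = ((1 : Int), (1 : Int), some x) := by
    simp [pvRunStep]
  rw [List.foldl_cons, hstep, pvRun_foldl xs 1 1 x le_rfl,
    pvN_sorted xs x 1 le_rfl hpw, pvMx_cons]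
  omega

-- ===== VERDICT (by name: the statement is the Claim_ definition above) =====
theorem shortest_k_length_spec : Claim_equal_shortest_k_length := by
  intro s _ hpre
  unfold Spec_shortest_k_length shortest_k_length shortest_k_length_alt
  have hl : s.toList ≠ [] := by simpa using hpre
  have hvals : (PySem.Dict.counter s.toList).values
      = (PySem.Set.ofList s.toList).map (fun k => (s.toList.count k : Int)) := by
    simp only [PySem.Dict.values, PySem.Dict.items_counter, List.map_map]
    rfl
  obtain ⟨x0, l0, hl0⟩ := List.exists_cons_of_ne_nil hl
  have hx0 : x0 ∈ s.toList := by rw [hl0]; simp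
  have hset_ne : PySem.Set.ofList s.toList ≠ [] := by
    intro h
    have := (PySem.Set.mem_ofList s.toList x0).2 hx0
    rw [h] at this; simp at this
  have hvne : (PySem.Dict.counter s.toList).values ≠ [] := by
    rw [hvals]
    simpa using hset_ne
  obtain ⟨m, hm⟩ : ∃ m, PySem.List.max? (PySem.Dict.counter s.toList).values (fun v => v) = some m := by
    cases hmax : PySem.List.max? (PySem.Dict.counter s.toList).values (fun v => v) with
    | none => exact absurd ((PySem.List.max?_eq_none_iff _ _).1 hmax) hvne
    | some m => exact ⟨m, rfl⟩
  -- B's side: the sorted list and its longest run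
  have hperm : (PySem.List.sorted s.toList (fun c : Char => c) false).Perm s.toList :=
    PySem.List.sorted_perm s.toList (fun c => c) false
  have hpw : (PySem.List.sorted s.toList (fun c : Char => c) false).Pairwise (· ≤ ·) := by
    simpa using PySem.List.sorted_pairwise (xs := s.toList) (key := fun c : Char => c)
  have htne : PySem.List.sorted s.toList (fun c : Char => c) false ≠ [] := by
    intro h
    exact hl ((PySem.List.sorted_eq_nil_iff _ _ _).1 h)
  -- m is the max multiplicity
  have hm_le : m ≤ pvMx (PySem.List.sorted s.toList (fun c : Char => c) false) := by
    have hmem := PySem.List.max?_mem hm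
    rw [hvals] at hmem
    obtain ⟨c, hc, hcm⟩ := List.mem_map.1 hmem
    have hcl : c ∈ s.toList := (PySem.Set.mem_ofList s.toList c).1 hc
    have hct : c ∈ PySem.List.sorted s.toList (fun c : Char => c) false := hperm.mem_iff.2 hcl
    have := pvMx_le _ c hct
    rw [hperm.count_eq] at this
    omega
  have hle_m : pvMx (PySem.List.sorted s.toList (fun c : Char => c) false) ≤ m := by
    obtain ⟨c, hct, hcc⟩ := pvMx_exists _ htne
    have hcl : c ∈ s.toList := hperm.mem_iff.1 hct
    have hmemv : ((s.toList.count c : Int)) ∈ (PySem.Dict.counter s.toList).values := by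
      rw [hvals]
      exact List.mem_map.2 ⟨c, (PySem.Set.mem_ofList s.toList c).2 hcl, rfl⟩
    have := PySem.List.max?_isMax hm _ hmemv
    rw [hperm.count_eq] at hcc
    simpa [← hcc] using this
  have hmM : m = pvMx (PySem.List.sorted s.toList (fun c : Char => c) false) :=
    le_antisymm hm_le hle_m
  -- the dict is nonempty, so its size is at least 1
  have hsize : (1 : Int) ≤ ((PySem.Dict.counter s.toList).size : Int) := by
    have : (PySem.Dict.counter s.toList).items ≠ [] := by
      rw [PySem.Dict.items_counter]
      simpa using hset_ne
    have hlen : 1 ≤ (PySem.Dict.counter s.toList).items.length :=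
      Nat.one_le_iff_ne_zero.2 (by simpa using this)
    exact_mod_cast hlen
  simp only [pvFreq_eq_counter, hm, pvBest_eq _ htne hpw, hmM]
  split_ifs <;> omega
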